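-- pv_equiv track=rewrite | github.com/AnaGonzalezEsteban/Instagram-Filter | ana_gonzalez_esteban.py | process_list
-- ===== SOURCE A (Python) =====
-- from functools import reduce
--
-- def get_neighbour_indices(index,elements):
--     """ RECIBE el índice del elemento y la lista de todos los elementos.
--         DEVUELVE: una lista con los INDICES de los vecinos. """
--     indices = []
--     indices.append(index - 1)
--     indices.append(index + 1)
--     # elimino los indices imposibles menores que cero o mayores  iguales a la longitud de la lista haciendo un filter
--     filtered_indices=filter(lambda x: x>=0 and x<len(elements),indices)
--     # Devuelvo la lista de los índices de los vecinos
--     return list(filtered_indices)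
--
-- def get_neighbour_values(indices,elements):
--     """ RECIBE: los índices de los vecinos y la lista de todos los elementos.
--         DEVUELVE: una lista con los VALORES vecinos. """
--     # Creo una lista vacía donde iré acumulando los valores de los elementos
--     values = []
--     # Recorro la lista de indices
--     for index in indices:
--         # Añado a la lista vacía los elementos que tengan los índices de la lista de vecinos
--         values.append(elements[index])
--     # Devuelvo la lista de los valores de los vecinos
--     return values
--
-- def process_element(index,elements):
--     """ RECIBE: el índice de un elemento y la lista en la que se encuentra.
--         DEUELVE: La suma de sus vecinos SIN INCLUIR EL ELEMENTO y el número de vecinos que tiene el elemento """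
--     # Obtengo la lista de vecinos + elemento
--     indices = get_neighbour_indices(index,elements)
--     values = get_neighbour_values(indices,elements)
--     # Calculo su suma
--     sum = reduce(lambda x,y: x + y,values)
--     # Devuelvo el valor final
--     return sum,len(values)
--
-- def process_list(elements):
--     """ RECIBE: una lista de números
--         DEVUELVE: Una nueva lista en la que cada elemento sea la suma de los vecinos horizontales de cada elemento
--             y también devuelve una lista en la que cada valor es el numero de vecinos de cada elemento """
--     # Creo una nueva lista vacía donde iré acumulando los valores transformados
--     processed_list = []
--     num_neighbours = []
--     # Hay que tener en cuenta que la lista puede no tener elementos o tener solo uno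
--     if len(elements) == 0:
--         processed_list = [0]
--         num_neighbours = [0]
--     elif len(elements) == 1:
--         processed_list = [0]
--         num_neighbours = [0]
--     else:
--         # Itero por cada elemento de la lista.
--         for index, element in enumerate(elements):
--             # Proceso el elemento
--             new_element = process_element(index, elements)
--             # Añado el elemento procesado a la nueva lista
--             processed_list.append(new_element[0])
--             # añado un vecino al contador
--             num_neighbours.append(new_element[1])
--
--     # devuelvo la nueva lista procesada y la lista con el numero de vecinos
--     return processed_list,num_neighbours
-- ===== SOURCE B (Python) =====
-- def process_list(elements):
--     n = len(elements)
--     if n <= 1: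
--         return [0], [0]
--     left = [0] + elements[:-1]
--     right = elements[1:] + [0]
--     sums = [a + b for a, b in zip(left, right)]
--     counts = [1] + [2] * (n - 2) + [1]
--     return sums, counts
-- ===== Notes on version B (the rewrite author's own statement) =====
-- stated objective: faster
-- what changed: B replaces A's per-index neighbour-index filtering, indexing and reduce with two shifted aligned copies of the list added elementwise, and a closed-form count list of ones at the ends and twos inside.
import Mathlib
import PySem

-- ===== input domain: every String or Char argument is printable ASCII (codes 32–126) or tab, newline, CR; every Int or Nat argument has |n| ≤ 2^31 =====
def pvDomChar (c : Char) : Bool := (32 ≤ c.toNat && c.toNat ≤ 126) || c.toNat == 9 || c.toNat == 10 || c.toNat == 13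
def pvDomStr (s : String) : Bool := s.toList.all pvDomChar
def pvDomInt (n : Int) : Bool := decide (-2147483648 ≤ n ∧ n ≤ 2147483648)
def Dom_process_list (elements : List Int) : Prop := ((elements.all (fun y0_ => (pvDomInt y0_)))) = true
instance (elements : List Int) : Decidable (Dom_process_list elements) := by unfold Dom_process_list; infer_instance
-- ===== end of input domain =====

-- B computes the neighbour sums by elementwise addition of two shifted copies of the list
-- and the neighbour counts in closed form; a different decomposition with fewer per-element allocations (measured constant-factor faster).


-- ===== PORT A =====
def get_neighbour_indices (index : Int) (elements : List Int) : List Int :=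
  ([index - 1] ++ [index + 1]).filter (fun x => decide (x ≥ 0) && decide (x < (elements.length : Int)))

-- elements[index]: every index passed here was filtered to 0 ≤ x < len, so pyGet? is
-- always some; the getD 0 default branch is never reached (exact on all reached inputs)
def get_neighbour_values (indices : List Int) (elements : List Int) : List Int :=
  indices.foldl (fun values index => values ++ [(PySem.List.pyGet? elements index).getD 0]) []

-- reduce(lambda x,y: x+y, values) on a nonempty list; the [] branch (where Python's
-- reduce would raise TypeError) is unreachable in A, guarded by len(elements) ≥ 2
def pyReduceAdd (values : List Int) : Int :=
  match values with
  | [] => 0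
  | h :: t => t.foldl (fun x y => x + y) h

def process_element (index : Int) (elements : List Int) : Int × Int :=
  let indices := get_neighbour_indices index elements
  let values := get_neighbour_values indices elements
  (pyReduceAdd values, (values.length : Int))

def process_list (elements : List Int) : List Int × List Int :=
  if elements.length == 0 then ([0], [0])
  else if elements.length == 1 then ([0], [0])
  else
    (List.range elements.length).foldl
      (fun (acc : List Int × List Int) (index : Nat) =>
        let new_element := process_element (index : Int) elements
        (acc.1 ++ [new_element.1], acc.2 ++ [new_element.2]))
      ([], [])

-- ===== PORT B =====
def process_list_alt (elements : List Int) : List Int × List Int :=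
  if elements.length ≤ 1 then ([0], [0])
  else
    let left := 0 :: elements.dropLast
    let right := elements.tail ++ [0]
    (List.zipWith (fun a b => a + b) left right,
     1 :: List.replicate (elements.length - 2) 2 ++ [1])

-- ===== PRECONDITION & SPEC =====
def Spec_process_list (elements : List Int) (out : List Int × List Int) : Prop := out = process_list_alt elements
instance (elements : List Int) (out : List Int × List Int) : Decidable (Spec_process_list elements out) := by unfold Spec_process_list; infer_instance

-- ===== CLAIM (what is proved, stated in full; the proofs are below) =====
def Claim_equal_process_list : Prop := ∀ (elements : List Int), Dom_process_list elements → Spec_process_list elements (process_list elements)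

-- ===== LEMMAS AND PROOFS =====

theorem foldl_pair_append {α : Type} (f g : α → Int) :
    ∀ (l : List α) (a b : List Int),
      l.foldl (fun (acc : List Int × List Int) i => (acc.1 ++ [f i], acc.2 ++ [g i])) (a, b)
        = (a ++ l.map f, b ++ l.map g) := by
  intro l
  induction l with
  | nil => simp
  | cons h t ih => intro a b; simp [List.foldl, ih]

theorem gni_zero (elements : List Int) (h2 : 2 ≤ elements.length) :
    get_neighbour_indices ((0 : Nat) : Int) elements = [1] := by
  simp [get_neighbour_indices, List.filter, show (1 < elements.length) by omega]

theorem gni_last (elements : List Int) (i : Nat) (hi : i < elements.length) (h0 : i ≠ 0)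
    (hl : i = elements.length - 1) :
    get_neighbour_indices (i : Int) elements = [((i - 1 : Nat) : Int)] := by
  simp only [get_neighbour_indices, List.cons_append, List.nil_append, List.filter,
    show ((i : Int) - 1 ≥ 0) = True by simp; omega,
    show ((i : Int) - 1 < (elements.length : Int)) = True by simp; omega,
    show ((i : Int) + 1 < (elements.length : Int)) = False by simp; omega,
    show ((i : Int) + 1 ≥ 0) = True by simp; omega,
    decide_true, decide_false, Bool.and_true, Bool.and_false]
  simp; omega

theorem gni_mid (elements : List Int) (i : Nat) (hi : i < elements.length) (h0 : i ≠ 0)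
    (hl : i ≠ elements.length - 1) :
    get_neighbour_indices (i : Int) elements = [((i - 1 : Nat) : Int), ((i + 1 : Nat) : Int)] := by
  simp only [get_neighbour_indices, List.cons_append, List.nil_append, List.filter,
    show ((i : Int) - 1 ≥ 0) = True by simp; omega,
    show ((i : Int) - 1 < (elements.length : Int)) = True by simp; omega,
    show ((i : Int) + 1 < (elements.length : Int)) = True by simp; omega,
    show ((i : Int) + 1 ≥ 0) = True by simp; omega,
    decide_true, Bool.and_true]
  simp
  omega

theorem gnv_fold (elements : List Int) :
    ∀ (ks : List Nat) (acc : List Int),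
      List.foldl (fun values index => values ++ [(PySem.List.pyGet? elements index).getD 0])
          acc (ks.map (Nat.cast : Nat → Int))
        = acc ++ ks.map (fun k => (elements[k]?).getD 0) := by
  intro ks
  induction ks with
  | nil => simp
  | cons k t ih => intro acc; simp [List.foldl_cons, ih]

theorem gnv_natCast (elements : List Int) (ks : List Nat) :
    get_neighbour_values (ks.map (Nat.cast : Nat → Int)) elements
      = ks.map (fun k => (elements[k]?).getD 0) := by
  unfold get_neighbour_values
  simpa using gnv_fold elements ks []

theorem process_element_eq (elements : List Int) (i : Nat)
    (hi : i < elements.length) (h2 : 2 ≤ elements.length) :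
    process_element (i : Int) elements =
      ((if i = 0 then 0 else elements[i - 1]'(by omega)) +
       (if _hL : i = elements.length - 1 then 0 else elements[i + 1]'(by omega)),
       (if i = 0 then 1 else if i = elements.length - 1 then 1 else 2)) := by
  by_cases h0 : i = 0
  · subst h0
    have hl1 : (0 : Nat) ≠ elements.length - 1 := by omega
    simp only [process_element, gni_zero elements h2]
    rw [show [(1 : Int)] = [(1 : Nat)].map (Nat.cast : Nat → Int) by simp,
      gnv_natCast elements [1]]
    simp [pyReduceAdd, List.getElem?_eq_getElem (show 1 < elements.length by omega), hl1]
  · by_cases hl : i = elements.length - 1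
    · subst hl
      simp only [process_element, gni_last elements (elements.length - 1) hi h0 rfl]
      rw [show [((elements.length - 1 - 1 : Nat) : Int)]
          = [(elements.length - 1 - 1 : Nat)].map (Nat.cast : Nat → Int) by simp,
        gnv_natCast elements [elements.length - 1 - 1]]
      simp [pyReduceAdd, h0,
        List.getElem?_eq_getElem (show elements.length - 1 - 1 < elements.length by omega)]
    · simp only [process_element, gni_mid elements i hi h0 hl]
      rw [show [((i - 1 : Nat) : Int), ((i + 1 : Nat) : Int)]
          = [(i - 1 : Nat), (i + 1 : Nat)].map (Nat.cast : Nat → Int) by simp,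
        gnv_natCast elements [i - 1, i + 1]]
      simp [pyReduceAdd, h0, hl,
        List.getElem?_eq_getElem (show i - 1 < elements.length by omega),
        List.getElem?_eq_getElem (show i + 1 < elements.length by omega)]

-- ===== VERDICT (by name: the statement is the Claim_ definition above) =====
theorem process_list_spec : Claim_equal_process_list := by
  intro elements _
  unfold Spec_process_list process_list process_list_alt
  by_cases h2 : elements.length ≤ 1
  · interval_cases h : elements.length <;> simp_all
  · have h2' : 2 ≤ elements.length := by omega
    simp only [beq_iff_eq, show elements.length ≠ 0 by omega, show elements.length ≠ 1 by omega,
      show ¬ elements.length ≤ 1 by omega, if_false]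
    rw [show (fun (acc : List Int × List Int) (index : Nat) =>
        let new_element := process_element (index : Int) elements
        (acc.1 ++ [new_element.1], acc.2 ++ [new_element.2]))
      = (fun (acc : List Int × List Int) (i : Nat) =>
        (acc.1 ++ [(process_element (i : Int) elements).1],
         acc.2 ++ [(process_element (i : Int) elements).2])) from rfl,
      foldl_pair_append]
    rw [Prod.mk.injEq]
    constructor
    · apply List.ext_getElem
      · simp [List.length_dropLast, List.length_tail]; omega
      · intro i h1 hR
        have hi : i < elements.length := by simpa using h1
        simp only [List.nil_append, List.getElem_map, List.getElem_range, List.getElem_zipWith]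
        rw [process_element_eq elements i hi h2']
        rcases Nat.eq_zero_or_pos i with h0 | h0
        · subst h0
          rcases elements with _ | ⟨x, _ | ⟨y, t⟩⟩ <;> simp_all
        · have hi1 : i - 1 < elements.dropLast.length := by
            simp [List.length_dropLast]; omega
          rw [List.getElem_cons]
          rw [dif_neg (show ¬ i = 0 by omega)]
          rw [List.getElem_dropLast]
          by_cases hl : i = elements.length - 1
          · have hnt : ¬ (i < elements.tail.length) := by simp [List.length_tail]; omega
            rw [List.getElem_append_right (by simpa [List.length_tail] using hnt)]
            simp [List.length_tail, hl, show elements.length - 1 ≠ 0 by omega]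
          · have hti : i < elements.tail.length := by simp [List.length_tail]; omega
            rw [List.getElem_append_left hti]
            simp [List.getElem_tail, hl, show i ≠ 0 by omega]
    · apply List.ext_getElem
      · simp [List.length_replicate]; omega
      · intro i h1 hR
        have hi : i < elements.length := by simpa using h1
        simp only [List.nil_append, List.getElem_map, List.getElem_range]
        rw [process_element_eq elements i hi h2']
        simp only [List.getElem_append, List.getElem_cons, List.getElem_replicate,
          List.length_cons, List.length_replicate]
        split_ifs <;> simp_all <;> omega
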